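-- pv_equiv track=rewrite | github.com/Xuanuio/Python3_PTIT | ThiGK_DC_Hieu-B2 Day Con Khong Giam Dai Nhat.py | find
-- ===== SOURCE A (Python) =====
-- def find(n, a, max_len):
--     # Hàm backtrack để tìm tất cả các dãy con tăng dài nhất
--     def backtrack(idx, cur_list):
--         if len(cur_list) == max_len:  # Nếu độ dài của dãy con hiện tại bằng max_len
--             result.append(cur_list[:])  # Thêm mảng trung gian của dãy con vào result
--             return
--         # Duyệt qua các phần tử từ vị trí idx
--         for i in range(idx, n):
--             # Nếu mảng trung gian rỗng hoặc a[i] >= phần tử cuối cùng của mảng trung gian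
--             if not cur_list or a[i] >= cur_list[-1]:
--                 # Gọi đệ quy với phần tử a[i] thêm vào cur_list
--                 backtrack(i + 1, cur_list + [a[i]])
--
--     result = []  # Mảng lưu tất cả các dãy con tăng dài nhất
--     backtrack(0, [])  # Bắt đầu gọi backtrack từ vị trí 0
--     return result
-- ===== SOURCE B (Python) =====
-- def find(n, a, max_len):
--     # Generate-and-test: enumerate index combinations of size max_len in
--     # lexicographic order, keep those whose values are non-decreasing.
--     if max_len < 0:
--         return []
--
--     def combs(k, idxs):
--         # all k-element subsequences of idxs, lexicographic order
--         if k == 0: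
--             return [[]]
--         if len(idxs) < k:
--             return []
--         first, rest = idxs[0], idxs[1:]
--         return [[first] + c for c in combs(k - 1, rest)] + combs(k, rest)
--
--     result = []
--     for combo in combs(max_len, range(n)):
--         if all(a[combo[j]] <= a[combo[j + 1]] for j in range(len(combo) - 1)):
--             result.append([a[i] for i in combo])
--     return result
-- ===== Notes on version B (the rewrite author's own statement) =====
-- stated objective: alternative
-- what changed: Replaces A's pruned recursive backtracking with flat generate-and-test: enumerate all index combinations of size max_len in lexicographic order, then keep those whose values are non-decreasing.
import Mathlib
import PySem

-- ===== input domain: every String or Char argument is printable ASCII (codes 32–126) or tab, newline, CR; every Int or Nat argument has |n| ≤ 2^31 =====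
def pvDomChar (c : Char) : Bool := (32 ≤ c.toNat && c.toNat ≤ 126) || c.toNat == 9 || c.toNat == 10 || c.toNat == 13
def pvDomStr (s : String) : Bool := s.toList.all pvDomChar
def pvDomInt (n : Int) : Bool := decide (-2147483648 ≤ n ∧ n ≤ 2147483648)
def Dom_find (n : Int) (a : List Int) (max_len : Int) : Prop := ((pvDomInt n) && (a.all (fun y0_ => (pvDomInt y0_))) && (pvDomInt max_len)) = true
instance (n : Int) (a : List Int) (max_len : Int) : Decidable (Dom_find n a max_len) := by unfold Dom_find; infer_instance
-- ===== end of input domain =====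

-- B replaces A's pruned recursive backtracking by flat generate-and-test over
-- index combinations (objective: alternative; same visiting order, no speed claim).

-- ===== PORT A =====
-- the recursive backtrack: findBT is one call, findLoop is its 'for i in range(idx, n)' loop
mutual
def findBT (n : Int) (a : List Int) (max_len : Int) (idx : Int) (cur : List Int) : List (List Int) :=
  if (cur.length : Int) = max_len then [cur]
  else findLoop n a max_len idx cur
termination_by ((n - idx).toNat, 1)

def findLoop (n : Int) (a : List Int) (max_len : Int) (i : Int) (cur : List Int) : List (List Int) :=
  if _h : i < n then
    (if cur = [] ∨ PySem.List.pyGetD a i 0 ≥ PySem.List.pyGetD cur (-1) 0 then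
       findBT n a max_len (i + 1) (cur ++ [PySem.List.pyGetD a i 0])
     else []) ++ findLoop n a max_len (i + 1) cur
  else []
termination_by ((n - i).toNat, 0)
end

def find (n : Int) (a : List Int) (max_len : Int) : List (List Int) :=
  findBT n a max_len 0 []

-- ===== PORT B =====
-- all k-element subsequences of idxs, lexicographic (combs in Source B)
def combsB (k : Int) (idxs : List Int) : List (List Int) :=
  if k = 0 then [[]]
  else if (idxs.length : Int) < k then []
  else match idxs with
    | [] => []
    | first :: rest => (combsB (k - 1) rest).map (fun c => [first] ++ c) ++ combsB k rest
termination_by idxs.length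

-- all(x <= y for x, y in zip(vals, vals[1:]))
def chkND (vals : List Int) : Bool :=
  (vals.zip (PySem.List.slice vals (some 1) none)).all (fun p => p.1 ≤ p.2)

def find_alt (n : Int) (a : List Int) (max_len : Int) : List (List Int) :=
  if max_len < 0 then []
  else
    (combsB max_len (PySem.List.pyRange 0 n 1)).foldl
      (fun result combo =>
        if chkND (combo.map (fun i => PySem.List.pyGetD a i 0)) then
          result ++ [combo.map (fun i => PySem.List.pyGetD a i 0)]
        else result) []

-- ===== PRECONDITION & SPEC =====
-- Pre_ excludes exactly the inputs where A raises IndexError: n > len(a) with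
-- max_len ≠ 0 makes the top-level loop evaluate a[len(a)].
def Pre_find (n : Int) (a : List Int) (max_len : Int) : Prop :=
  n ≤ (a.length : Int) ∨ max_len = 0

instance (n : Int) (a : List Int) (max_len : Int) : Decidable (Pre_find n a max_len) := by
  unfold Pre_find; infer_instance

def pvWitness_find : Int × List Int × Int := (3, ([1, 2, 1], 2))

def Spec_find (n : Int) (a : List Int) (max_len : Int) (out : List (List Int)) : Prop :=
  out = find_alt n a max_len

instance (n : Int) (a : List Int) (max_len : Int) (out : List (List Int)) :
    Decidable (Spec_find n a max_len out) := by unfold Spec_find; infer_instance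

-- ===== CLAIM (what is proved, stated in full; the proofs are below) =====
def Claim_equal_find : Prop := ∀ (n : Int) (a : List Int) (max_len : Int),
  Dom_find n a max_len → Pre_find n a max_len → Spec_find n a max_len (find n a max_len)

-- ===== LEMMAS AND PROOFS =====

-- chain "values non-decreasing", carrying the previous value (A's cur[-1])
def okv (last : Option Int) (vs : List Int) : Bool :=
  match vs with
  | [] => true
  | v :: vs' => (match last with | none => true | some w => decide (w ≤ v)) && okv (some v) vs'

theorem okv_none_eq_chkND : ∀ vs : List Int, okv none vs = chkND vs := by
  intro vs
  induction vs with
  | nil => simp [okv, chkND, PySem.List.slice_from_one]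
  | cons v t ih =>
    cases t with
    | nil => simp [okv, chkND, PySem.List.slice_from_one]
    | cons w t' =>
      have h1 : okv none (v :: w :: t') = (decide (v ≤ w) && okv none (w :: t')) := by
        simp [okv]
      rw [h1, ih]
      simp [chkND, PySem.List.slice_from_one, List.zip]

theorem combsB_nil (k : Int) (hk : k ≠ 0) : combsB k [] = [] := by
  rw [combsB.eq_def]
  simp [hk]

theorem combsB_cons (k : Int) (hk : 1 ≤ k) (x : Int) (rest : List Int) :
    combsB k (x :: rest) =
      (combsB (k - 1) rest).map (fun c => [x] ++ c) ++ combsB k rest := by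
  rw [combsB.eq_def]
  have hk0 : ¬ k = 0 := by omega
  by_cases hlen : ((x :: rest).length : Int) < k
  · -- not enough elements: all three are empty
    simp only [hk0, if_false, hlen, if_true]
    have h1 : combsB (k - 1) rest = [] := by
      rw [combsB.eq_def]
      have hne : ¬ (k - 1) = 0 := by simp at hlen; omega
      have hl : ((rest.length : Int) < k - 1) := by simp at hlen ⊢; omega
      simp only [hne, if_false, hl, if_true]
    have h2 : combsB k rest = [] := by
      rw [combsB.eq_def]
      have hl : ((rest.length : Int) < k) := by simp at hlen ⊢; omega
      simp only [hk0, if_false, hl, if_true]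
    simp [h1, h2]
  · rw [if_neg hk0, if_neg hlen]

-- head test of okv, as A's loop condition sees it
def headOK (last : Option Int) (v : Int) : Bool :=
  match last with | none => true | some w => decide (w ≤ v)

theorem okv_cons (last : Option Int) (v : Int) (vs : List Int) :
    okv last (v :: vs) = (headOK last v && okv (some v) vs) := rfl

theorem cond_eq (cur : List Int) (v : Int) :
    decide (cur = [] ∨ v ≥ PySem.List.pyGetD cur (-1) 0) = headOK cur.getLast? v := by
  cases hc : cur.getLast? with
  | none =>
    have : cur = [] := List.getLast?_eq_none_iff.mp hc
    simp [this, headOK]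
  | some w =>
    have hne : cur ≠ [] := by rintro rfl; simp at hc
    rw [PySem.List.pyGetD_neg_one (h := hne)]
    have hw : cur.getLast hne = w := by
      rw [List.getLast?_eq_some_getLast hne] at hc
      exact Option.some_inj.mp hc
    simp [hne, headOK, hw, ge_iff_le]

-- the main invariant: the loop from index i with partial list cur produces exactly
-- the filtered-mapped combinations of the remaining index range
theorem loop_eq (n : Int) (a : List Int) (max_len : Int) :
    ∀ (m : Nat) (i : Int) (cur : List Int), (n - i).toNat ≤ m →
      (cur.length : Int) < max_len →
      findLoop n a max_len i cur =
        ((combsB (max_len - cur.length) (PySem.List.pyRange i n 1)).filter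
            (fun c => okv cur.getLast? (c.map (fun j => PySem.List.pyGetD a j 0)))).map
          (fun c => cur ++ c.map (fun j => PySem.List.pyGetD a j 0)) := by
  intro m
  induction m with
  | zero =>
    intro i cur hm hlt
    have hni : n ≤ i := by omega
    rw [findLoop.eq_def, dif_neg (by omega : ¬ i < n)]
    rw [PySem.List.pyRange_one_eq_nil hni, combsB_nil _ (by omega)]
    simp
  | succ m ih =>
    intro i cur hm hlt
    by_cases h : i < n
    · rw [findLoop.eq_def, dif_pos h]
      rw [PySem.List.pyRange_one_cons h,
          combsB_cons _ (by omega) i (PySem.List.pyRange (i + 1) n 1),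
          List.filter_append, List.map_append]
      have hm' : (n - (i + 1)).toNat ≤ m := by omega
      rw [ih (i + 1) cur hm' hlt]
      congr 1
      rw [List.filter_map, List.map_map]
      have hpred : ∀ c : List Int,
          ((fun c => okv cur.getLast? (c.map (fun j => PySem.List.pyGetD a j 0))) ∘
              (fun c => [i] ++ c)) c
            = (headOK cur.getLast? (PySem.List.pyGetD a i 0)
                && okv (some (PySem.List.pyGetD a i 0))
                    (c.map (fun j => PySem.List.pyGetD a j 0))) := by
        intro c; simp [Function.comp, okv_cons]
      rw [List.filter_congr (fun c _ => hpred c)]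
      by_cases hcond : cur = [] ∨ PySem.List.pyGetD a i 0 ≥ PySem.List.pyGetD cur (-1) 0
      · rw [if_pos hcond]
        have hh : headOK cur.getLast? (PySem.List.pyGetD a i 0) = true := by
          rw [← cond_eq]; exact decide_eq_true hcond
        simp only [hh, Bool.true_and]
        rw [findBT.eq_def]
        by_cases hfull : (((cur ++ [PySem.List.pyGetD a i 0]).length : Int)) = max_len
        · rw [if_pos hfull]
          have hk1 : combsB (max_len - (cur.length : Int) - 1)
              (PySem.List.pyRange (i + 1) n 1) = [[]] := by
            have h0 : max_len - (cur.length : Int) - 1 = 0 := by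
              simp at hfull; omega
            rw [h0, combsB.eq_def]; simp
          rw [hk1]
          simp [okv, Function.comp]
        · rw [if_neg hfull]
          have hlt' : (((cur ++ [PySem.List.pyGetD a i 0]).length : Int)) < max_len := by
            simp at hfull ⊢; omega
          rw [ih (i + 1) _ hm' hlt']
          have hlast : (cur ++ [PySem.List.pyGetD a i 0]).getLast?
              = some (PySem.List.pyGetD a i 0) := by simp
          rw [hlast]
          have harith : max_len - (((cur ++ [PySem.List.pyGetD a i 0]).length : Int))
              = max_len - (cur.length : Int) - 1 := by
            simp; ring
          rw [harith]
          apply List.map_congr_left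
          intro c _
          simp [Function.comp, List.append_assoc]
      · rw [if_neg hcond]
        have hh : headOK cur.getLast? (PySem.List.pyGetD a i 0) = false := by
          rw [← cond_eq]; exact decide_eq_false hcond
        simp only [hh, Bool.false_and]
        simp
    · rw [findLoop.eq_def, dif_neg h]
      have hni : n ≤ i := by omega
      rw [PySem.List.pyRange_one_eq_nil hni, combsB_nil _ (by omega)]
      simp

theorem bt_eq (n : Int) (a : List Int) (max_len : Int) (i : Int) (cur : List Int)
    (hle : (cur.length : Int) ≤ max_len) :
    findBT n a max_len i cur =
      ((combsB (max_len - cur.length) (PySem.List.pyRange i n 1)).filter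
          (fun c => okv cur.getLast? (c.map (fun j => PySem.List.pyGetD a j 0)))).map
        (fun c => cur ++ c.map (fun j => PySem.List.pyGetD a j 0)) := by
  rw [findBT.eq_def]
  by_cases hfull : ((cur.length : Int)) = max_len
  · rw [if_pos hfull]
    have : max_len - (cur.length : Int) = 0 := by omega
    rw [this, combsB.eq_def]
    simp [okv]
  · rw [if_neg hfull]
    exact loop_eq n a max_len (n - i).toNat i cur (le_refl _) (by omega)

theorem loop_neg (n : Int) (a : List Int) (max_len : Int) (hneg : max_len < 0) :
    ∀ (m : Nat) (i : Int) (cur : List Int), (n - i).toNat ≤ m →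
      findLoop n a max_len i cur = [] := by
  intro m
  induction m with
  | zero =>
    intro i cur hm
    rw [findLoop.eq_def, dif_neg (by omega : ¬ i < n)]
  | succ m ih =>
    intro i cur hm
    by_cases h : i < n
    · rw [findLoop.eq_def, dif_pos h]
      have hm' : (n - (i + 1)).toNat ≤ m := by omega
      rw [ih (i + 1) cur hm']
      rw [findBT.eq_def]
      have : ¬ (((cur ++ [PySem.List.pyGetD a i 0]).length : Int) = max_len) := by
        have : (0:Int) ≤ ((cur ++ [PySem.List.pyGetD a i 0]).length : Int) := by positivity
        omega
      rw [if_neg this, ih (i + 1) _ hm']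
      simp
    · rw [findLoop.eq_def, dif_neg h]

-- ===== VERDICT (by name: the statement is the Claim_ definition above) =====
theorem find_spec : Claim_equal_find := by
  intro n a max_len _hdom _hpre
  show find n a max_len = find_alt n a max_len
  by_cases hneg : max_len < 0
  · rw [find, find_alt, if_pos hneg, findBT.eq_def]
    have h0 : ¬ ((([] : List Int).length : Int) = max_len) := by simp; omega
    rw [if_neg h0]
    exact loop_neg n a max_len hneg (n - 0).toNat 0 [] (le_refl _)
  · rw [find, find_alt, if_neg hneg]
    rw [bt_eq n a max_len 0 [] (by simp; omega)]
    rw [PySem.List.foldl_append_if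
      (fun combo : List Int => chkND (combo.map (fun i => PySem.List.pyGetD a i 0)))
      (fun combo : List Int => combo.map (fun i => PySem.List.pyGetD a i 0))]
    simp only [List.length_nil, Int.natCast_zero, sub_zero, List.getLast?_nil,
      List.nil_append]
    rw [List.filter_congr
      (fun c _ => okv_none_eq_chkND (c.map (fun j => PySem.List.pyGetD a j 0)))]
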